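-- pv_equiv track=rewrite | github.com/lengthwisehems/retail2 | frame_inventory_with_measurements.py | determine_color_fields
-- ===== SOURCE A (Python) =====
-- from typing import Any, Dict, Iterable, List, Optional, Tuple
--
-- SIMPLIFIED_COLOR_MAP = {
--     "darkwash": "Dark wash",
--     "lightwash": "Light wash",
--     "mediumwash": "Medium wash",
-- }
--
-- STANDARD_COLOR_OPTIONS = {
--     "BLUE",
--     "BLACK",
--     "WHITE",
--     "BEIGE",
--     "BROWN",
--     "RED",
--     "GREEN",
--     "GREY",
--     "PINK",
--     "PURPLE",
--     "MULTI",
--     "YELLOW",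
--     "ORANGE",
--     "PRINT",
-- }
--
-- def determine_color_fields(tags: Iterable[str]) -> Tuple[str, str]:
--     simplified = ""
--     standardized = ""
--     for tag in tags:
--         if not tag.lower().replace("filter-", "filter").startswith("filtercolor::"):
--             continue
--         value = tag.split("::", 1)[1].strip()
--         normalized = value.replace(" ", "").replace("-", "").lower()
--         if not simplified and normalized in SIMPLIFIED_COLOR_MAP:
--             simplified = SIMPLIFIED_COLOR_MAP[normalized]
--         upper_value = value.replace("-", " ").strip().upper()
--         if not standardized and upper_value in STANDARD_COLOR_OPTIONS:
--             standardized = upper_value.title()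
--     return simplified, standardized
-- ===== SOURCE B (Python) =====
-- from typing import Iterable, Optional, Tuple
--
-- SIMPLIFIED_COLOR_MAP = {
--     "darkwash": "Dark wash",
--     "lightwash": "Light wash",
--     "mediumwash": "Medium wash",
-- }
--
-- STANDARD_COLOR_OPTIONS = {
--     "BLUE", "BLACK", "WHITE", "BEIGE", "BROWN", "RED", "GREEN",
--     "GREY", "PINK", "PURPLE", "MULTI", "YELLOW", "ORANGE", "PRINT",
-- }
--
-- def _parse(tag: str) -> Optional[Tuple[str, str]]:
--     """For a filtercolor tag, return (normalized key, upper value); else None."""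
--     if not tag.lower().replace("filter-", "filter").startswith("filtercolor::"):
--         return None
--     value = tag.split("::", 1)[1].strip()
--     return (value.replace(" ", "").replace("-", "").lower(),
--             value.replace("-", " ").strip().upper())
--
-- def determine_color_fields(tags: Iterable[str]) -> Tuple[str, str]:
--     parsed = [p for p in map(_parse, tags) if p is not None]
--     simplified = next((SIMPLIFIED_COLOR_MAP[n] for n, _ in parsed
--                        if n in SIMPLIFIED_COLOR_MAP), "")
--     standardized = next((u.title() for _, u in parsed
--                          if u in STANDARD_COLOR_OPTIONS), "")
--     return simplified, standardized
-- ===== Notes on version B (the rewrite author's own statement) =====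
-- stated objective: simpler
-- what changed: A's single loop threading interleaved first-non-empty-wins state is replaced by one parse-and-filter pass over the tags followed by two independent first-match searches over the parsed pairs.
import Mathlib
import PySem

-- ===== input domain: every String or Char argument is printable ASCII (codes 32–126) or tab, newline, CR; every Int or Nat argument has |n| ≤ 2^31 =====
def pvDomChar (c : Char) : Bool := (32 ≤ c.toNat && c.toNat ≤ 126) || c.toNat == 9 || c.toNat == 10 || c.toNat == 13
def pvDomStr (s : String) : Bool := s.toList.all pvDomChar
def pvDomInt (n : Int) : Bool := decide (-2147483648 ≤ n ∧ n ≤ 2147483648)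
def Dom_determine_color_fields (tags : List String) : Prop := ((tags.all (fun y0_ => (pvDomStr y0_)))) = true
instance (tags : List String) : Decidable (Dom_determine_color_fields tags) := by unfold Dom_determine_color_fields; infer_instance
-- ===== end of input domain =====

-- B replaces A's single loop with interleaved "first non-empty wins" state by one
-- parse-and-filter pass followed by two independent first-match searches (simpler decomposition).

-- module constants shared by both Pythons
def SIMPLIFIED_COLOR_MAP : PySem.Dict String String :=
  PySem.Dict.ofList [("darkwash", "Dark wash"), ("lightwash", "Light wash"), ("mediumwash", "Medium wash")]

def STANDARD_COLOR_OPTIONS : PySem.Set String :=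
  PySem.Set.ofList ["BLUE", "BLACK", "WHITE", "BEIGE", "BROWN", "RED", "GREEN",
                    "GREY", "PINK", "PURPLE", "MULTI", "YELLOW", "ORANGE", "PRINT"]

-- str.title, ported by hand (PySem has no title); exact on the ASCII domain:
-- a letter is uppercased after a non-letter, lowercased after a letter.
def pyTitleChars : List Char → Bool → List Char
  | [], _ => []
  | c :: rest, prevAlpha =>
    (if PySem.Str.isalpha c then
       (if prevAlpha then PySem.Chars.lowerChar c else PySem.Chars.upperChar c)
     else c) :: pyTitleChars rest (PySem.Str.isalpha c)

def pyTitle (s : String) : String := String.ofList (pyTitleChars s.toList false)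

-- ===== PORT A =====
-- A's loop body; xs[1] of the split: Python raises IndexError if "::" were absent, but the
-- startswith guard guarantees "::" is present, so the pyGetD default "" is unreachable.
def detStepA (st : String × String) (tag : String) : String × String :=
  if !(PySem.Str.startswith (PySem.Str.replace (PySem.Str.lower tag) "filter-" "filter") "filtercolor::") then
    st
  else
    let value := PySem.Str.strip (PySem.List.pyGetD ((PySem.Str.splitMax? tag "::" 1).getD []) 1 "")
    let normalized := PySem.Str.lower (PySem.Str.replace (PySem.Str.replace value " " "") "-" "")
    let simplified :=
      if st.1 == "" && (SIMPLIFIED_COLOR_MAP.get? normalized).isSome then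
        SIMPLIFIED_COLOR_MAP.getD normalized "" else st.1
    let upper_value := PySem.Str.upper (PySem.Str.strip (PySem.Str.replace value "-" " "))
    let standardized :=
      if st.2 == "" && STANDARD_COLOR_OPTIONS.contains upper_value then
        pyTitle upper_value else st.2
    (simplified, standardized)

def determine_color_fields (tags : List String) : String × String :=
  tags.foldl detStepA ("", "")

-- ===== PORT B =====
def parseTag (tag : String) : Option (String × String) :=
  if !(PySem.Str.startswith (PySem.Str.replace (PySem.Str.lower tag) "filter-" "filter") "filtercolor::") then
    none
  else
    let value := PySem.Str.strip (PySem.List.pyGetD ((PySem.Str.splitMax? tag "::" 1).getD []) 1 "")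
    some (PySem.Str.lower (PySem.Str.replace (PySem.Str.replace value " " "") "-" ""),
          PySem.Str.upper (PySem.Str.strip (PySem.Str.replace value "-" " ")))

def determine_color_fields_alt (tags : List String) : String × String :=
  let parsed := tags.filterMap parseTag
  let simplified :=
    match parsed.find? (fun p => (SIMPLIFIED_COLOR_MAP.get? p.1).isSome) with
    | some p => SIMPLIFIED_COLOR_MAP.getD p.1 ""
    | none => ""
  let standardized :=
    match parsed.find? (fun p => STANDARD_COLOR_OPTIONS.contains p.2) with
    | some p => pyTitle p.2
    | none => ""
  (simplified, standardized)

-- ===== PRECONDITION & SPEC =====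
def Spec_determine_color_fields (tags : List String) (out : String × String) : Prop := out = determine_color_fields_alt tags
instance (tags : List String) (out : String × String) : Decidable (Spec_determine_color_fields tags out) := by unfold Spec_determine_color_fields; infer_instance

-- ===== CLAIM (what is proved, stated in full; the proofs are below) =====
def Claim_equal_determine_color_fields : Prop := ∀ (tags : List String), Dom_determine_color_fields tags → Spec_determine_color_fields tags (determine_color_fields tags)

-- ===== LEMMAS AND PROOFS =====

-- B's two searches, factored per component (proof-only helpers)
def altS (l : List (String × String)) : String :=
  match l.find? (fun p => (SIMPLIFIED_COLOR_MAP.get? p.1).isSome) with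
  | some p => SIMPLIFIED_COLOR_MAP.getD p.1 ""
  | none => ""

def altT (l : List (String × String)) : String :=
  match l.find? (fun p => STANDARD_COLOR_OPTIONS.contains p.2) with
  | some p => pyTitle p.2
  | none => ""

lemma alt_eq (tags : List String) :
    determine_color_fields_alt tags =
      (altS (tags.filterMap parseTag), altT (tags.filterMap parseTag)) := rfl

lemma altS_cons (p : String × String) (l : List (String × String)) :
    altS (p :: l) =
      if (SIMPLIFIED_COLOR_MAP.get? p.1).isSome = true then SIMPLIFIED_COLOR_MAP.getD p.1 "" else altS l := by
  unfold altS
  by_cases h : (SIMPLIFIED_COLOR_MAP.get? p.1).isSome = true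
  · rw [List.find?_cons_of_pos (p := fun q : String × String => (SIMPLIFIED_COLOR_MAP.get? q.1).isSome) h, if_pos h]
  · rw [List.find?_cons_of_neg (p := fun q : String × String => (SIMPLIFIED_COLOR_MAP.get? q.1).isSome) h, if_neg h]

lemma altT_cons (p : String × String) (l : List (String × String)) :
    altT (p :: l) =
      if STANDARD_COLOR_OPTIONS.contains p.2 = true then pyTitle p.2 else altT l := by
  unfold altT
  by_cases h : STANDARD_COLOR_OPTIONS.contains p.2 = true
  · rw [List.find?_cons_of_pos (p := fun q : String × String => STANDARD_COLOR_OPTIONS.contains q.2) h, if_pos h]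
  · rw [List.find?_cons_of_neg (p := fun q : String × String => STANDARD_COLOR_OPTIONS.contains q.2) h, if_neg h]

-- the three simplified-map values are non-empty
lemma smap_getD_ne (n : String) (h : (SIMPLIFIED_COLOR_MAP.get? n).isSome = true) :
    SIMPLIFIED_COLOR_MAP.getD n "" ≠ "" := by
  have e : SIMPLIFIED_COLOR_MAP = PySem.Dict.mk
      [("darkwash", "Dark wash"), ("lightwash", "Light wash"), ("mediumwash", "Medium wash")] := rfl
  rw [e, PySem.Dict.getD_eq_get?_getD]
  rw [e] at h
  simp only [PySem.Dict.get?_mk_cons] at h ⊢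
  split_ifs at h ⊢ <;> simp_all [PySem.Dict.get?]

-- every standard color option has a non-empty title
lemma std_title_ne (u : String) (h : STANDARD_COLOR_OPTIONS.contains u = true) :
    pyTitle u ≠ "" := by
  have hm : u ∈ (["BLUE", "BLACK", "WHITE", "BEIGE", "BROWN", "RED", "GREEN",
                  "GREY", "PINK", "PURPLE", "MULTI", "YELLOW", "ORANGE", "PRINT"] : List String) :=
    (PySem.Set.contains_iff _ _).mp h
  fin_cases hm <;> decide

-- A's loop body, expressed through B's parse of the same tag
lemma step_of_parse_none (tag : String) (s t : String) (hp : parseTag tag = none) :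
    detStepA (s, t) tag = (s, t) := by
  cases hg : PySem.Str.startswith (PySem.Str.replace (PySem.Str.lower tag) "filter-" "filter") "filtercolor::" with
  | false => simp only [detStepA, hg, Bool.not_false, if_true]
  | true =>
    simp only [parseTag, hg, Bool.not_true, Bool.false_eq_true, if_false] at hp
    simp at hp

lemma step_of_parse_some (tag : String) (s t n u : String) (hp : parseTag tag = some (n, u)) :
    detStepA (s, t) tag =
      ((if (s == "" && (SIMPLIFIED_COLOR_MAP.get? n).isSome) = true then SIMPLIFIED_COLOR_MAP.getD n "" else s),
       (if (t == "" && STANDARD_COLOR_OPTIONS.contains u) = true then pyTitle u else t)) := by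
  cases hg : PySem.Str.startswith (PySem.Str.replace (PySem.Str.lower tag) "filter-" "filter") "filtercolor::" with
  | false =>
    simp only [parseTag, hg, Bool.not_false, if_true] at hp
    simp at hp
  | true =>
    simp only [parseTag, hg, Bool.not_true, Bool.false_eq_true, if_false,
      Option.some.injEq, Prod.mk.injEq] at hp
    obtain ⟨hn, hu⟩ := hp
    simp only [detStepA, hg, Bool.not_true, Bool.false_eq_true, if_false, hn, hu]

-- loop invariant: A's fold from any state equals B's searches where the state is still empty
lemma loop_eq (tags : List String) : ∀ s t : String,
    tags.foldl detStepA (s, t) =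
      ((if s = "" then altS (tags.filterMap parseTag) else s),
       (if t = "" then altT (tags.filterMap parseTag) else t)) := by
  induction tags with
  | nil =>
    intro s t
    simp only [List.foldl_nil, List.filterMap_nil, altS, altT, List.find?_nil, Prod.mk.injEq]
    constructor <;> (split <;> simp_all)
  | cons tag rest ih =>
    intro s t
    cases hp : parseTag tag with
    | none =>
      rw [List.foldl_cons, step_of_parse_none tag s t hp, ih,
        List.filterMap_cons_none hp]
    | some p =>
      obtain ⟨n, u⟩ := p
      rw [List.foldl_cons, step_of_parse_some tag s t n u hp, ih,
        List.filterMap_cons_some hp, altS_cons, altT_cons, Prod.mk.injEq]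
      constructor
      · by_cases hs : s = "" <;> by_cases hc : (SIMPLIFIED_COLOR_MAP.get? n).isSome = true
        · simp [hs, hc, smap_getD_ne n hc]
        · simp [hs, hc]
        · simp [hs]
        · simp [hs]
      · by_cases ht : t = "" <;> by_cases hc : STANDARD_COLOR_OPTIONS.contains u = true
        · have hmem : u ∈ STANDARD_COLOR_OPTIONS := (PySem.Set.contains_iff _ _).mp hc
          simp [ht, hmem, std_title_ne u hc]
        · have hmem : u ∉ STANDARD_COLOR_OPTIONS := fun m => hc ((PySem.Set.contains_iff _ _).mpr m)
          simp [ht, hmem]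
        · simp [ht]
        · simp [ht]

-- ===== VERDICT (by name: the statement is the Claim_ definition above) =====
theorem determine_color_fields_spec : Claim_equal_determine_color_fields := by
  intro tags _
  unfold Spec_determine_color_fields determine_color_fields
  rw [loop_eq tags "" "", alt_eq]
  simp
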